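-- pv_equiv track=rewrite | github.com/Chickeninvader/Logic_tensor_network | helper_function.py | create_label_dict
-- ===== SOURCE A (Python) =====
-- def create_label_dict(category_dict):
--     # Initialize dictionaries
--     coarse_label_dict = {}
--     fine_label_dict = {}
--     coarse_to_fine = {}
--
--     # Assign numerical labels
--     coarse_label_counter = 0
--     fine_label_counter = len(category_dict)
--
--     # Iterate through the input dictionary
--     for category, labels in category_dict.items():
--         # Assign a numerical label to the coarse category
--         coarse_label_dict[category] = coarse_label_counter
--
--         # Create an empty list to store fine labels for this coarse category
--         coarse_to_fine[coarse_label_counter] = []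
--
--         # Iterate through labels in the category
--         for label in labels:
--             # Assign a numerical label to the fine label
--             fine_label_dict[label] = fine_label_counter
--
--             # Add the fine label to the list of fine labels for this coarse category
--             coarse_to_fine[coarse_label_counter].append(fine_label_counter)
--
--             # Increment the fine label counter
--             fine_label_counter += 1
--
--         # Increment the coarse label counter
--         coarse_label_counter += 1
--
--     # Return the resulting dictionaries
--     return coarse_label_dict, fine_label_dict, coarse_to_fine
-- ===== SOURCE B (Python) =====
-- def create_label_dict(category_dict):
--     cats = list(category_dict)
--     groups = list(category_dict.values())
--     n = len(cats)
--     # stage 1: coarse labels are just the positions of the categories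
--     coarse_label_dict = dict(zip(cats, range(n)))
--     # stage 2: one global enumeration of the flattened label stream, offset by n
--     all_labels = [label for labels in groups for label in labels]
--     fine_label_dict = {label: n + i for i, label in enumerate(all_labels)}
--     # stage 3: cut [n, n + len(all_labels)) at the cumulative group boundaries
--     starts = [n]
--     for labels in groups:
--         starts.append(starts[-1] + len(labels))
--     coarse_to_fine = {i: list(range(a, b))
--                       for i, (a, b) in enumerate(zip(starts, starts[1:]))}
--     return coarse_label_dict, fine_label_dict, coarse_to_fine
-- ===== Notes on version B (the rewrite author's own statement) =====
-- stated objective: alternative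
-- what changed: Replaces A's single pass of nested counter-incrementing loops by three independent stages: coarse labels from zip(cats, range(n)); fine labels from one global enumeration of the flattened label stream; coarse_to_fine by cutting the global index interval at prefix-sum boundaries of the group lengths.
import Mathlib
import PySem

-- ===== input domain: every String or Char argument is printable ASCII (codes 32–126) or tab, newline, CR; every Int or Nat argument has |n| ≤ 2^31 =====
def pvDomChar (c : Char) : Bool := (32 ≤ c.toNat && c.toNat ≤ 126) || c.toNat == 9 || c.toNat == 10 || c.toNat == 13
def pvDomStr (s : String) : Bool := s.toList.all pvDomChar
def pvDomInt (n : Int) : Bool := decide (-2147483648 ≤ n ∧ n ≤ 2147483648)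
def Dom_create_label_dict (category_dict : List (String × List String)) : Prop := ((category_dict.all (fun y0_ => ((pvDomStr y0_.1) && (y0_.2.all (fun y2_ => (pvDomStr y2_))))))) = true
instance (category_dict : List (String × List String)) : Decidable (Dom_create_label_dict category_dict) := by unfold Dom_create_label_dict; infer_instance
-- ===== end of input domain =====

-- B replaces A's nested counter loops by three staged passes (zip, global enumerate of the flattened labels, prefix-sum boundaries); same result.

-- ===== PORT A =====
-- inner loop body: for label in labels: fine_label_dict[label] = fc; coarse_to_fine[cc].append(fc); fc += 1
def aInner (cc : Int) (st : PySem.Dict String Int × PySem.Dict Int (List Int) × Int) (label : String) :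
    PySem.Dict String Int × PySem.Dict Int (List Int) × Int :=
  match st with
  | (fl, c2f, fc) => (fl.insert label fc, c2f.modify cc [] (fun fs => fs ++ [fc]), fc + 1)

-- outer loop body over (category, labels); state = (coarse_label_dict, fine_label_dict, coarse_to_fine, cc, fc)
def aStep (st : PySem.Dict String Int × PySem.Dict String Int × PySem.Dict Int (List Int) × Int × Int)
    (p : String × List String) :
    PySem.Dict String Int × PySem.Dict String Int × PySem.Dict Int (List Int) × Int × Int :=
  match st with
  | (cl, fl, c2f, cc, fc) =>
    let inner := p.2.foldl (aInner cc) (fl, c2f.insert cc [], fc)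
    (cl.insert p.1 cc, inner.1, inner.2.1, cc + 1, inner.2.2)

def create_label_dict (category_dict : List (String × List String)) :
    (List (String × Int)) × (List (String × Int)) × (List (Int × List Int)) :=
  let st := category_dict.foldl aStep
    (PySem.Dict.empty, PySem.Dict.empty, PySem.Dict.empty, 0, (category_dict.length : Int))
  (st.1.items, st.2.1.items, st.2.2.1.items)

-- ===== PORT B =====
-- stage 3 loop: for labels in groups: starts.append(starts[-1] + len(labels))
def bStartsStep (acc : List Int) (labels : List String) : List Int :=
  acc ++ [acc.getLast! + (labels.length : Int)]

def create_label_dict_alt (category_dict : List (String × List String)) :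
    (List (String × Int)) × (List (String × Int)) × (List (Int × List Int)) :=
  let cats := category_dict.map Prod.fst
  let groups := category_dict.map Prod.snd
  let n : Int := cats.length
  -- coarse_label_dict = dict(zip(cats, range(n)))
  let coarse := PySem.Dict.ofList (cats.zip (PySem.List.pyRange 0 n))
  -- all_labels = [label for labels in groups for label in labels]
  let all_labels := groups.flatMap id
  -- fine_label_dict = {label: n + i for i, label in enumerate(all_labels)}
  let fine := (PySem.List.enumerate all_labels).foldl
    (fun d p => d.insert p.2 (n + p.1)) PySem.Dict.empty
  let starts := groups.foldl bStartsStep [n]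
  -- starts[1:] ported as starts.drop 1 (exact: nonnegative slice start on a concrete list)
  let c2f := (PySem.List.enumerate (starts.zip (starts.drop 1))).foldl
    (fun d p => d.insert p.1 (PySem.List.pyRange p.2.1 p.2.2)) PySem.Dict.empty
  (coarse.items, fine.items, c2f.items)

-- ===== PRECONDITION & SPEC =====
def Spec_create_label_dict (category_dict : List (String × List String)) (out : (List (String × Int)) × (List (String × Int)) × (List (Int × List Int))) : Prop := out = create_label_dict_alt category_dict
instance (category_dict : List (String × List String)) (out : (List (String × Int)) × (List (String × Int)) × (List (Int × List Int))) : Decidable (Spec_create_label_dict category_dict out) := by unfold Spec_create_label_dict; infer_instance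

-- ===== CLAIM (what is proved, stated in full; the proofs are below) =====
def Claim_equal_create_label_dict : Prop := ∀ (category_dict : List (String × List String)), Dom_create_label_dict category_dict → Spec_create_label_dict category_dict (create_label_dict category_dict)

-- ===== LEMMAS AND PROOFS =====

-- consecutive boundary pairs of the prefix sums of group lengths, starting at fc
def pairsOf (fc : Int) : List (List String) → List (Int × Int)
  | [] => []
  | g :: gs => (fc, fc + g.length) :: pairsOf (fc + g.length) gs

-- A's inner loop, started with coarse_to_fine[cc] = acc, writes the contiguous range fc .. fc+len-1
lemma inner_eq (ls : List String) : ∀ (fl : PySem.Dict String Int) (c2f : PySem.Dict Int (List Int))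
    (cc fc : Int) (acc : List Int),
    ls.foldl (aInner cc) (fl, c2f.insert cc acc, fc)
      = (fl.update (ls.zip (PySem.List.pyRange fc (fc + ls.length))),
         c2f.insert cc (acc ++ PySem.List.pyRange fc (fc + ls.length)),
         fc + ls.length) := by
  induction ls with
  | nil =>
    intro fl c2f cc fc acc
    simp [PySem.Dict.update]
  | cons l ls ih =>
    intro fl c2f cc fc acc
    have hlt : fc < fc + ((l :: ls).length : Int) := by simp
    rw [PySem.List.pyRange_one_cons hlt]
    have hgetD : (c2f.insert cc acc).getD cc [] = acc := PySem.Dict.getD_insert_self c2f cc acc []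
    have hstep : aInner cc (fl, c2f.insert cc acc, fc) l
        = (fl.insert l fc, c2f.insert cc (acc ++ [fc]), fc + 1) := by
      simp [aInner, PySem.Dict.modify, hgetD, PySem.Dict.insert_insert_self]
    have harith : fc + ((l :: ls).length : Int) = (fc + 1) + (ls.length : Int) := by
      simp; omega
    simp only [List.foldl_cons, hstep, List.zip_cons_cons]
    rw [harith, ih (fl.insert l fc) c2f cc (fc + 1) (acc ++ [fc])]
    simp [PySem.Dict.update]

-- A's fold, staged: coarse by zip, fine by one global zip of the flattened labels, c2f by boundary pairs
lemma fold_eq (l : List (String × List String)) : ∀ (cl fl : PySem.Dict String Int)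
    (c2f : PySem.Dict Int (List Int)) (cc fc : Int),
    l.foldl aStep (cl, fl, c2f, cc, fc)
      = (cl.update ((l.map Prod.fst).zip (PySem.List.pyRange cc (cc + l.length))),
         fl.update (((l.map Prod.snd).flatMap id).zip
           (PySem.List.pyRange fc (fc + ((l.map Prod.snd).flatMap id).length))),
         (PySem.List.enumerate (pairsOf fc (l.map Prod.snd)) cc).foldl
           (fun d p => d.insert p.1 (PySem.List.pyRange p.2.1 p.2.2)) c2f,
         cc + l.length,
         fc + ((l.map Prod.snd).flatMap id).length) := by
  induction l with
  | nil => intro cl fl c2f cc fc; simp [PySem.Dict.update, pairsOf]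
  | cons p l ih =>
    intro cl fl c2f cc fc
    have hstep : aStep (cl, fl, c2f, cc, fc) p
        = (cl.insert p.1 cc,
           fl.update (p.2.zip (PySem.List.pyRange fc (fc + p.2.length))),
           c2f.insert cc (PySem.List.pyRange fc (fc + p.2.length)),
           cc + 1,
           fc + p.2.length) := by
      simp [aStep, inner_eq p.2 fl c2f cc fc []]
    simp only [List.foldl_cons, hstep]
    rw [ih]
    have hccons : cc < cc + ((p :: l).length : Int) := by simp
    rw [PySem.List.pyRange_one_cons hccons]
    have harithc : cc + ((p :: l).length : Int) = (cc + 1) + (l.length : Int) := by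
      simp; omega
    have hflat : ((p :: l).map Prod.snd).flatMap id = p.2 ++ (l.map Prod.snd).flatMap id := by
      simp
    have hlenr : p.2.length = (PySem.List.pyRange fc (fc + p.2.length)).length := by
      simp [PySem.List.length_pyRange_one]
    have harithf : fc + ((((p :: l).map Prod.snd).flatMap id).length : Int)
        = (fc + p.2.length) + (((l.map Prod.snd).flatMap id).length : Int) := by
      rw [hflat]; push_cast [List.length_append]; ring
    simp only [Prod.mk.injEq]
    refine ⟨?_, ?_, ?_, harithc.symm, harithf.symm⟩
    · rw [harithc]
      simp [PySem.Dict.update]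
    · rw [harithf, hflat,
        PySem.List.pyRange_one_append fc (fc + (p.2.length : Int))
          (fc + (p.2.length : Int) + (((l.map Prod.snd).flatMap id).length : Int))
          (by omega) (by omega),
        List.zip_append hlenr]
      simp [PySem.Dict.update, List.foldl_append]
    · simp only [List.map_cons, pairsOf, PySem.List.enumerate_cons, List.foldl_cons]

-- B's fine-dict loop is a dict update with the zipped range
lemma fine_eq (xs : List String) : ∀ (d : PySem.Dict String Int) (n s : Int),
    (PySem.List.enumerate xs s).foldl (fun d p => d.insert p.2 (n + p.1)) d
      = d.update (xs.zip (PySem.List.pyRange (n + s) (n + s + xs.length))) := by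
  induction xs with
  | nil => intro d n s; simp [PySem.Dict.update]
  | cons x xs ih =>
    intro d n s
    have hlt : n + s < n + s + ((x :: xs).length : Int) := by simp
    rw [PySem.List.pyRange_one_cons hlt]
    have harith : n + s + ((x :: xs).length : Int) = (n + (s + 1)) + (xs.length : Int) := by
      simp; omega
    have harith2 : n + (s + 1) = (n + s) + 1 := by omega
    simp only [PySem.List.enumerate_cons, List.foldl_cons, List.zip_cons_cons]
    rw [harith, ← harith2, ih (d.insert x (n + s)) n (s + 1)]
    simp [PySem.Dict.update]

-- the prefix-sum boundary list the starts loop builds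
def startsList (fc : Int) : List (List String) → List Int
  | [] => [fc]
  | g :: gs => fc :: startsList (fc + g.length) gs

-- the starts loop only ever reads the last element of its accumulator
lemma starts_run (gs : List (List String)) : ∀ (pre : List Int) (fc : Int),
    gs.foldl bStartsStep (pre ++ [fc]) = pre ++ startsList fc gs := by
  induction gs with
  | nil => intro pre fc; simp [startsList]
  | cons g gs ih =>
    intro pre fc
    have hlast : (pre ++ [fc]).getLast! = fc := by simp
    simp only [List.foldl_cons, bStartsStep, hlast]
    rw [show (pre ++ [fc]) ++ [fc + (g.length : Int)]
          = (pre ++ [fc]) ++ [fc + (g.length : Int)] from rfl,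
      ih (pre ++ [fc]) (fc + (g.length : Int))]
    simp [startsList]

-- consecutive pairs of the boundary list are exactly pairsOf
lemma pairs_of_startsList (gs : List (List String)) : ∀ (fc : Int),
    (startsList fc gs).zip ((startsList fc gs).drop 1) = pairsOf fc gs := by
  induction gs with
  | nil => intro fc; simp [startsList, pairsOf]
  | cons g gs ih =>
    intro fc
    rcases gs with _ | ⟨g', gs'⟩
    · simp [startsList, pairsOf]
    · have h := ih (fc + (g.length : Int))
      simp only [startsList] at h ⊢
      simp only [pairsOf, List.drop_succ_cons, List.drop_zero, List.zip_cons_cons] at h ⊢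
      rw [h]

-- ===== VERDICT (by name: the statement is the Claim_ definition above) =====
theorem create_label_dict_spec : Claim_equal_create_label_dict := by
  intro cd _
  unfold Spec_create_label_dict
  show create_label_dict cd = create_label_dict_alt cd
  have hs : (cd.map Prod.snd).foldl bStartsStep [(cd.length : Int)]
      = startsList (cd.length : Int) (cd.map Prod.snd) := by
    simpa using starts_run (cd.map Prod.snd) [] (cd.length : Int)
  have hf := fine_eq ((cd.map Prod.snd).flatMap id) PySem.Dict.empty (cd.length : Int) 0
  simp only [create_label_dict, create_label_dict_alt, fold_eq, hs, pairs_of_startsList, hf,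
    zero_add, add_zero, PySem.Dict.ofList, List.length_map]
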